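-- pv_equiv track=rewrite | github.com/ndusenbai/beProBackend | tests/services.py | get_results_for_test_four
-- ===== SOURCE A (Python) =====
-- class TestFourGroups:
--     group_1 = {1, 2, 3, 4, 22, 23, 24, 25, 43, 44, 45, 46, 64, 65, 66, 67, 85, 86, 87, 88, 89}
--     group_2 = {5, 6, 7, 8, 9, 26, 27, 28, 29, 47, 48, 49, 50, 68, 69, 70, 71, 90, 91, 92}
--     group_3 = {10, 11, 30, 31, 32, 51, 52, 53, 54, 72, 73, 74, 75, 93, 94, 95, 96}
--     group_4 = {12, 13, 14, 33, 34, 35, 55, 56, 76, 77, 97, 98}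
--     group_5 = {15, 16, 36, 37, 57, 58, 78, 79, 80, 99, 100, 101}
--     group_6 = {17, 18, 38, 39, 59, 60, 81, 82, 102, 103}
--     group_7 = {19, 20, 21, 40, 41, 42, 61, 62, 63, 83, 84, 104, 105}
--
-- def get_results_for_test_four(questions: list) -> tuple:
--     result_1 = result_2 = result_3 = result_4 = result_5 = result_6 = result_7 = 0
--
--     for i, value in enumerate(questions):
--         j = i + 1
--         if j in TestFourGroups.group_1:
--             if value:
--                 result_1 += 1
--         elif j in TestFourGroups.group_2:
--             if value:
--                 result_2 += 1
--         elif j in TestFourGroups.group_3: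
--             if value:
--                 result_3 += 1
--         elif j in TestFourGroups.group_4:
--             if value:
--                 result_4 += 1
--         elif j in TestFourGroups.group_5:
--             if value:
--                 result_5 += 1
--         elif j in TestFourGroups.group_6:
--             if value:
--                 result_6 += 1
--         elif j in TestFourGroups.group_7:
--             if value:
--                 result_7 += 1
--
--     return result_1, result_2, result_3, result_4, result_5, result_6, result_7
-- ===== SOURCE B (Python) =====
-- TEST_FOUR_GROUPS = (
--     (1, 2, 3, 4, 22, 23, 24, 25, 43, 44, 45, 46, 64, 65, 66, 67, 85, 86, 87, 88, 89),
--     (5, 6, 7, 8, 9, 26, 27, 28, 29, 47, 48, 49, 50, 68, 69, 70, 71, 90, 91, 92),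
--     (10, 11, 30, 31, 32, 51, 52, 53, 54, 72, 73, 74, 75, 93, 94, 95, 96),
--     (12, 13, 14, 33, 34, 35, 55, 56, 76, 77, 97, 98),
--     (15, 16, 36, 37, 57, 58, 78, 79, 80, 99, 100, 101),
--     (17, 18, 38, 39, 59, 60, 81, 82, 102, 103),
--     (19, 20, 21, 40, 41, 42, 61, 62, 63, 83, 84, 104, 105),
-- )
--
-- def get_results_for_test_four(questions: list) -> tuple:
--     n = len(questions)
--     return tuple(
--         sum(1 for idx in group if idx - 1 < n and questions[idx - 1])
--         for group in TEST_FOUR_GROUPS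
--     )
-- ===== Notes on version B (the rewrite author's own statement) =====
-- stated objective: faster
-- what changed: A makes one pass over all n answers, classifying each index through a 7-way elif chain over the group sets; B loops over the seven groups themselves and, for each group, counts truthy answers at that group's member positions (valid because the groups are disjoint), so only the 105 fixed positions are ever inspected.
import Mathlib
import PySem

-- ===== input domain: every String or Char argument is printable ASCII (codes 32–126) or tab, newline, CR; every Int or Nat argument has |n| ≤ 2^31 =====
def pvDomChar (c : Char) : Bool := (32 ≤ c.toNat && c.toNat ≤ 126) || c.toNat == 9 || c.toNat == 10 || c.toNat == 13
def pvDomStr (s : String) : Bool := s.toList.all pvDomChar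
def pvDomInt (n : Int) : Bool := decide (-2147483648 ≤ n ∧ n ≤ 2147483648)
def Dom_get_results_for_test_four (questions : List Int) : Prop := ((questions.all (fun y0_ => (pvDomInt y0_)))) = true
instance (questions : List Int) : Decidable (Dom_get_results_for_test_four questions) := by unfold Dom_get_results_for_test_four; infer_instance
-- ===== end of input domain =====

-- B replaces A's single classify-each-answer pass (elif chain over 7 sets) by a per-group
-- outer loop: for each of the 7 groups, count truthy answers at that group's member positions
-- (objective: faster — only the 105 fixed positions are inspected instead of all n answers; exact same results, the groups are disjoint).

-- ===== PORT A =====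
def pvG1 : PySem.Set Int := PySem.Set.ofList [1, 2, 3, 4, 22, 23, 24, 25, 43, 44, 45, 46, 64, 65, 66, 67, 85, 86, 87, 88, 89]
def pvG2 : PySem.Set Int := PySem.Set.ofList [5, 6, 7, 8, 9, 26, 27, 28, 29, 47, 48, 49, 50, 68, 69, 70, 71, 90, 91, 92]
def pvG3 : PySem.Set Int := PySem.Set.ofList [10, 11, 30, 31, 32, 51, 52, 53, 54, 72, 73, 74, 75, 93, 94, 95, 96]
def pvG4 : PySem.Set Int := PySem.Set.ofList [12, 13, 14, 33, 34, 35, 55, 56, 76, 77, 97, 98]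
def pvG5 : PySem.Set Int := PySem.Set.ofList [15, 16, 36, 37, 57, 58, 78, 79, 80, 99, 100, 101]
def pvG6 : PySem.Set Int := PySem.Set.ofList [17, 18, 38, 39, 59, 60, 81, 82, 102, 103]
def pvG7 : PySem.Set Int := PySem.Set.ofList [19, 20, 21, 40, 41, 42, 61, 62, 63, 83, 84, 104, 105]

-- the body of A's for-loop: the elif chain, updating the seven accumulators
def pvStepA (acc : Int × Int × Int × Int × Int × Int × Int) (p : Int × Int) :
    Int × Int × Int × Int × Int × Int × Int :=
  let (r1, r2, r3, r4, r5, r6, r7) := acc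
  let j := p.1 + 1
  if PySem.Set.contains pvG1 j then (if p.2 ≠ 0 then (r1 + 1, r2, r3, r4, r5, r6, r7) else acc)
  else if PySem.Set.contains pvG2 j then (if p.2 ≠ 0 then (r1, r2 + 1, r3, r4, r5, r6, r7) else acc)
  else if PySem.Set.contains pvG3 j then (if p.2 ≠ 0 then (r1, r2, r3 + 1, r4, r5, r6, r7) else acc)
  else if PySem.Set.contains pvG4 j then (if p.2 ≠ 0 then (r1, r2, r3, r4 + 1, r5, r6, r7) else acc)
  else if PySem.Set.contains pvG5 j then (if p.2 ≠ 0 then (r1, r2, r3, r4, r5 + 1, r6, r7) else acc)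
  else if PySem.Set.contains pvG6 j then (if p.2 ≠ 0 then (r1, r2, r3, r4, r5, r6 + 1, r7) else acc)
  else if PySem.Set.contains pvG7 j then (if p.2 ≠ 0 then (r1, r2, r3, r4, r5, r6, r7 + 1) else acc)
  else acc

def get_results_for_test_four (questions : List Int) : Int × Int × Int × Int × Int × Int × Int :=
  (PySem.List.enumerate questions 0).foldl pvStepA (0, 0, 0, 0, 0, 0, 0)

-- ===== PORT B =====
def pvL1 : List Int := [1, 2, 3, 4, 22, 23, 24, 25, 43, 44, 45, 46, 64, 65, 66, 67, 85, 86, 87, 88, 89]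
def pvL2 : List Int := [5, 6, 7, 8, 9, 26, 27, 28, 29, 47, 48, 49, 50, 68, 69, 70, 71, 90, 91, 92]
def pvL3 : List Int := [10, 11, 30, 31, 32, 51, 52, 53, 54, 72, 73, 74, 75, 93, 94, 95, 96]
def pvL4 : List Int := [12, 13, 14, 33, 34, 35, 55, 56, 76, 77, 97, 98]
def pvL5 : List Int := [15, 16, 36, 37, 57, 58, 78, 79, 80, 99, 100, 101]
def pvL6 : List Int := [17, 18, 38, 39, 59, 60, 81, 82, 102, 103]
def pvL7 : List Int := [19, 20, 21, 40, 41, 42, 61, 62, 63, 83, 84, 104, 105]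

-- sum(1 for idx in group if idx - 1 < n and questions[idx - 1]); Python's short-circuit 'and'
-- only indexes when idx - 1 < n (and idx ≥ 1 for all group members), so pyGetD is exact here.
def pvCount (questions : List Int) (group : List Int) : Int :=
  group.foldl
    (fun acc idx =>
      if idx - 1 < (questions.length : Int) ∧ PySem.List.pyGetD questions (idx - 1) 0 ≠ 0
      then acc + 1 else acc) 0

def get_results_for_test_four_alt (questions : List Int) : Int × Int × Int × Int × Int × Int × Int :=
  (pvCount questions pvL1, pvCount questions pvL2, pvCount questions pvL3, pvCount questions pvL4,
   pvCount questions pvL5, pvCount questions pvL6, pvCount questions pvL7)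

-- ===== PRECONDITION & SPEC =====
def Spec_get_results_for_test_four (questions : List Int) (out : Int × Int × Int × Int × Int × Int × Int) : Prop := out = get_results_for_test_four_alt questions
instance (questions : List Int) (out : Int × Int × Int × Int × Int × Int × Int) : Decidable (Spec_get_results_for_test_four questions out) := by unfold Spec_get_results_for_test_four; infer_instance

-- ===== CLAIM (what is proved, stated in full; the proofs are below) =====
def Claim_equal_get_results_for_test_four : Prop := ∀ (questions : List Int), Dom_get_results_for_test_four questions → Spec_get_results_for_test_four questions (get_results_for_test_four questions)

-- ===== LEMMAS AND PROOFS =====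

-- the Bool test A's elif chain effectively applies for component k, at loop index j
def pvChain1 (j : Int) : Bool := PySem.Set.contains pvG1 j
def pvChain2 (j : Int) : Bool := !PySem.Set.contains pvG1 j && PySem.Set.contains pvG2 j
def pvChain3 (j : Int) : Bool := !PySem.Set.contains pvG1 j && !PySem.Set.contains pvG2 j && PySem.Set.contains pvG3 j
def pvChain4 (j : Int) : Bool := !PySem.Set.contains pvG1 j && !PySem.Set.contains pvG2 j && !PySem.Set.contains pvG3 j && PySem.Set.contains pvG4 j
def pvChain5 (j : Int) : Bool := !PySem.Set.contains pvG1 j && !PySem.Set.contains pvG2 j && !PySem.Set.contains pvG3 j && !PySem.Set.contains pvG4 j && PySem.Set.contains pvG5 j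
def pvChain6 (j : Int) : Bool := !PySem.Set.contains pvG1 j && !PySem.Set.contains pvG2 j && !PySem.Set.contains pvG3 j && !PySem.Set.contains pvG4 j && !PySem.Set.contains pvG5 j && PySem.Set.contains pvG6 j
def pvChain7 (j : Int) : Bool := !PySem.Set.contains pvG1 j && !PySem.Set.contains pvG2 j && !PySem.Set.contains pvG3 j && !PySem.Set.contains pvG4 j && !PySem.Set.contains pvG5 j && !PySem.Set.contains pvG6 j && PySem.Set.contains pvG7 j

def pvCond (ch : Int → Bool) (p : Int × Int) : Bool := ch (p.1 + 1) && (p.2 != 0)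

-- A's fold computes, in each component, the countP of its chain condition
lemma pvFoldA (l : List (Int × Int)) (a1 a2 a3 a4 a5 a6 a7 : Int) :
    l.foldl pvStepA (a1, a2, a3, a4, a5, a6, a7) =
      (a1 + (l.countP (pvCond pvChain1) : Int), a2 + (l.countP (pvCond pvChain2) : Int),
       a3 + (l.countP (pvCond pvChain3) : Int), a4 + (l.countP (pvCond pvChain4) : Int),
       a5 + (l.countP (pvCond pvChain5) : Int), a6 + (l.countP (pvCond pvChain6) : Int),
       a7 + (l.countP (pvCond pvChain7) : Int)) := by
  induction l generalizing a1 a2 a3 a4 a5 a6 a7 with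
  | nil => simp
  | cons p t ih =>
    simp only [List.foldl_cons, pvStepA]
    split_ifs <;>
      simp_all [pvCond, pvChain1, pvChain2, pvChain3, pvChain4, pvChain5,
        pvChain6, pvChain7] <;> ring

-- each chain test coincides (for every j) with plain membership, since the groups are disjoint
lemma pvChain_eq_1 (j : Int) : pvChain1 j = decide (j ∈ pvL1) := by
  simp [pvChain1, pvG1, pvL1, PySem.Set.contains, PySem.Set.ofList]
lemma pvChain_eq_2 (j : Int) : pvChain2 j = decide (j ∈ pvL2) := by
  by_cases h : j ∈ pvL2
  · fin_cases h <;> decide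
  · simp only [h, decide_false]
    simp only [pvChain2, pvG2, pvL2, PySem.Set.contains, PySem.Set.ofList] at h ⊢
    simp_all
lemma pvChain_eq_3 (j : Int) : pvChain3 j = decide (j ∈ pvL3) := by
  by_cases h : j ∈ pvL3
  · fin_cases h <;> decide
  · simp only [h, decide_false]
    simp only [pvChain3, pvG3, pvL3, PySem.Set.contains, PySem.Set.ofList] at h ⊢
    simp_all
lemma pvChain_eq_4 (j : Int) : pvChain4 j = decide (j ∈ pvL4) := by
  by_cases h : j ∈ pvL4
  · fin_cases h <;> decide
  · simp only [h, decide_false]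
    simp only [pvChain4, pvG4, pvL4, PySem.Set.contains, PySem.Set.ofList] at h ⊢
    simp_all
lemma pvChain_eq_5 (j : Int) : pvChain5 j = decide (j ∈ pvL5) := by
  by_cases h : j ∈ pvL5
  · fin_cases h <;> decide
  · simp only [h, decide_false]
    simp only [pvChain5, pvG5, pvL5, PySem.Set.contains, PySem.Set.ofList] at h ⊢
    simp_all
lemma pvChain_eq_6 (j : Int) : pvChain6 j = decide (j ∈ pvL6) := by
  by_cases h : j ∈ pvL6
  · fin_cases h <;> decide
  · simp only [h, decide_false]
    simp only [pvChain6, pvG6, pvL6, PySem.Set.contains, PySem.Set.ofList] at h ⊢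
    simp_all
lemma pvChain_eq_7 (j : Int) : pvChain7 j = decide (j ∈ pvL7) := by
  by_cases h : j ∈ pvL7
  · fin_cases h <;> decide
  · simp only [h, decide_false]
    simp only [pvChain7, pvG7, pvL7, PySem.Set.contains, PySem.Set.ofList] at h ⊢
    simp_all

-- countP of a disjunctive test splits when the two disjuncts never hold together
lemma pvCountP_or {α : Type} (l : List α) (a b c : α → Bool)
    (h : ∀ x, ¬(a x = true ∧ b x = true)) :
    l.countP (fun x => (a x || b x) && c x) =
      l.countP (fun x => a x && c x) + l.countP (fun x => b x && c x) := by
  induction l with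
  | nil => simp
  | cons x t ih =>
    have hx := h x
    simp only [List.countP_cons, ih]
    cases ha : a x <;> cases hb : b x <;> simp_all <;> omega

-- on a strictly increasing list, a test forcing j = m hits at most once
lemma pvCountP_single (l : List Int) (hl : l.Pairwise (· < ·)) (m : Int) (c : Int → Bool) :
    l.countP (fun j => (j == m) && c j) = if m ∈ l ∧ c m then 1 else 0 := by
  induction l with
  | nil => simp
  | cons x t ih =>
    rcases List.pairwise_cons.mp hl with ⟨hx, ht⟩
    by_cases hxm : x = m
    · subst hxm
      have hnx : x ∉ t := fun hm => absurd (hx x hm) (lt_irrefl x)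
      rw [List.countP_cons, ih ht]
      cases hc : c x <;> simp [hnx]
    · have hmx : ¬ m = x := fun h => hxm h.symm
      rw [List.countP_cons, ih ht]
      simp [hxm, hmx]

-- core: counting matching positions over the answers equals counting over the group's members
-- pvCount as a countP over the group list
lemma pvCount_eq (qs L : List Int) :
    pvCount qs L = (L.countP (fun idx =>
      decide (idx - 1 < (qs.length : Int) ∧ PySem.List.pyGetD qs (idx - 1) 0 ≠ 0)) : Int) := by
  rw [pvCount, PySem.List.foldl_ite_add_one]
  simp

-- core: counting matching positions over the answers equals counting over the group's members
lemma pvSwap (qs : List Int) (L : List Int) (hL : L.Nodup) (h1 : ∀ m ∈ L, 1 ≤ m) :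
    ((PySem.List.pyRange 0 (qs.length : Int) 1).countP
        (fun j => decide ((j + 1) ∈ L) && (PySem.List.pyGetD qs j 0 != 0)) : Int) =
      pvCount qs L := by
  rw [pvCount_eq]
  congr 1
  induction L with
  | nil => simp
  | cons m t ih =>
    have hm1 : (1 : Int) ≤ m := h1 m (by simp)
    obtain ⟨hmt, ht⟩ := List.nodup_cons.mp hL
    have hstep : (PySem.List.pyRange 0 (qs.length : Int) 1).countP
        (fun j => decide ((j + 1) ∈ m :: t) && (PySem.List.pyGetD qs j 0 != 0)) =
        (PySem.List.pyRange 0 (qs.length : Int) 1).countP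
          (fun j => ((j + 1 == m) || decide ((j + 1) ∈ t)) && (PySem.List.pyGetD qs j 0 != 0)) := by
      apply List.countP_congr
      intro j _
      simp [List.mem_cons]
    rw [hstep, pvCountP_or _ _ _ _ (by
      intro j
      rintro ⟨hj, hjt⟩
      exact hmt (by simpa [beq_iff_eq.mp hj] using (of_decide_eq_true hjt)))]
    have hone : (PySem.List.pyRange 0 (qs.length : Int) 1).countP
        (fun j => (j + 1 == m) && (PySem.List.pyGetD qs j 0 != 0)) =
        (PySem.List.pyRange 0 (qs.length : Int) 1).countP
          (fun j => (j == m - 1) && (PySem.List.pyGetD qs j 0 != 0)) := by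
      apply List.countP_congr
      intro j _
      have : (j + 1 == m) = (j == m - 1) := by
        rw [Bool.eq_iff_iff]
        simp only [beq_iff_eq]
        omega
      rw [this]
    rw [hone, pvCountP_single _ (PySem.List.pairwise_lt_pyRange_one _ _) (m - 1)
        (fun j => (PySem.List.pyGetD qs j 0 != 0)),
      List.countP_cons, ih ht (fun x hx => h1 x (List.mem_cons_of_mem _ hx))]
    have hiff : ((m - 1) ∈ PySem.List.pyRange 0 (qs.length : Int) 1 ∧
        (PySem.List.pyGetD qs (m - 1) 0 != 0) = true) ↔
        (m - 1 < (qs.length : Int) ∧ PySem.List.pyGetD qs (m - 1) 0 ≠ 0) := by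
      rw [PySem.List.mem_pyRange_one]
      constructor
      · rintro ⟨⟨_, h2⟩, h3⟩; exact ⟨h2, by simpa using h3⟩
      · rintro ⟨h2, h3⟩; exact ⟨⟨by omega, h2⟩, by simpa using h3⟩
    rw [if_congr hiff rfl rfl]
    simp only [decide_eq_true_eq]
    omega

-- ===== VERDICT (by name: the statement is the Claim_ definition above) =====
-- A's component k as a count over the index range, then swap to B's per-group count
lemma pvComp (qs : List Int) (ch : Int → Bool) (L : List Int)
    (hch : ∀ j, ch j = decide (j ∈ L)) (hL : L.Nodup) (h1 : ∀ m ∈ L, 1 ≤ m) :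
    (((PySem.List.enumerate qs 0).countP (pvCond ch) : Int)) = pvCount qs L := by
  rw [PySem.List.enumerate_eq_map_pyRange (d := 0), List.countP_map]
  rw [← pvSwap qs L hL h1]
  congr 1
  apply List.countP_congr
  intro j _
  simp [pvCond, Function.comp, hch]

theorem get_results_for_test_four_spec : Claim_equal_get_results_for_test_four := by
  unfold Claim_equal_get_results_for_test_four
  intro qs _
  unfold Spec_get_results_for_test_four get_results_for_test_four get_results_for_test_four_alt
  rw [pvFoldA]
  simp only [zero_add]
  rw [pvComp qs pvChain1 pvL1 pvChain_eq_1 (by decide) (by decide),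
    pvComp qs pvChain2 pvL2 pvChain_eq_2 (by decide) (by decide),
    pvComp qs pvChain3 pvL3 pvChain_eq_3 (by decide) (by decide),
    pvComp qs pvChain4 pvL4 pvChain_eq_4 (by decide) (by decide),
    pvComp qs pvChain5 pvL5 pvChain_eq_5 (by decide) (by decide),
    pvComp qs pvChain6 pvL6 pvChain_eq_6 (by decide) (by decide),
    pvComp qs pvChain7 pvL7 pvChain_eq_7 (by decide) (by decide)]
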